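-- pv_equiv track=rewrite | github.com/iqbalpa/DDP-1 | Lab/Lab08/kopit.py | penularan
-- ===== SOURCE A (Python) =====
-- def penularan(lst_input, kamus):
--
--     # base case: jika panjang list adalah 0
--     if len(lst_input) == 0:
--         return kamus
--
--     # recursive case
--     else:
--
--         # mendapatkan daftar nama dari elemen pertama di lst_input
--         names = lst_input[0]
--         names = names.split()
--
--         # penular adalah nama pertama di list names
--         penular = names[0]
--
--         # tertular adalah nama selain penular
--         tertular = names[1:]
--
--         for nama in kamus:
--             if penular in kamus[nama]:
--                 kamus[nama] += tertular
--
--         # membuat dictionaries dengan key adalah penular dan values adalah tertular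
--         if penular not in kamus:
--             kamus[penular] = tertular
--         else:
--             kamus[penular] += tertular
--
--         return penularan(lst_input[1:], kamus)
-- ===== SOURCE B (Python) =====
-- def penularan(lst_input, kamus):
--     for line in lst_input:
--         parts = line.split()
--         penular = parts[0]
--         tertular = parts[1:]
--         kamus = {k: (v + tertular if penular in v else v) for k, v in kamus.items()}
--         if penular in kamus:
--             kamus[penular] = kamus[penular] + tertular
--         else:
--             kamus[penular] = tertular
--     return kamus
-- ===== Notes on version B (the rewrite author's own statement) =====
-- stated objective: idiomatic
-- what changed: Slice-recursion with an in-place key-scan mutation loop is replaced by a single iterative pass that rebuilds the dictionary purely with a dict comprehension per line (return-value equivalence; B does not mutate the caller's kamus).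
import Mathlib
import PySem

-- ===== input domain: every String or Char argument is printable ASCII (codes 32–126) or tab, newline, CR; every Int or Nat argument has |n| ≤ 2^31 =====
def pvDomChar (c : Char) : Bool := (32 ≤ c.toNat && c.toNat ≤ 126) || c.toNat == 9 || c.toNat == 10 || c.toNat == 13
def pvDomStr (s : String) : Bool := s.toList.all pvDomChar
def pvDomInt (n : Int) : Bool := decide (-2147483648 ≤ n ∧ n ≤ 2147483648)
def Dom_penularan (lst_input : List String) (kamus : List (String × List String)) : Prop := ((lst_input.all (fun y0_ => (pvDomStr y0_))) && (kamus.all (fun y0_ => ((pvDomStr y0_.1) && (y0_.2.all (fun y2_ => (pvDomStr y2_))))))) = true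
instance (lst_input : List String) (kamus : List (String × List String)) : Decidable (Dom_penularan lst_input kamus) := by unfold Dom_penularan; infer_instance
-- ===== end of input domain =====

-- B replaces A's slice-recursion with in-place mutation by a single iterative pass that
-- purely rebuilds the dict per line (idiomatic); equivalence is about the RETURN value:
-- A mutates the caller's kamus in place, B does not.

-- ===== PORT A =====
-- first-match dict lookup (exact Python dict semantics on the unique-key dicts Pre_ admits)
def lookupFirst (d : List (String × List String)) (k : String) : List String :=
  match d with
  | [] => []
  | kv :: rest => if kv.1 = k then kv.2 else lookupFirst rest k

-- first-match dict value update d[k] += t (exact on unique-key dicts)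
def updFirst (d : List (String × List String)) (k : String) (t : List String) :
    List (String × List String) :=
  match d with
  | [] => []
  | kv :: rest => if kv.1 = k then (kv.1, kv.2 ++ t) :: rest else kv :: updFirst rest k t

-- the body of A's recursive case, acting on kamus for one line
def stepA (kamus : List (String × List String)) (line : String) :
    List (String × List String) :=
  let names := PySem.Str.split₀ line
  let penular := (PySem.List.pyGet? names 0).getD ""   -- names[0]; none (IndexError) excluded by Pre_
  let tertular := PySem.List.slice names (some 1) none -- names[1:]
  -- for nama in kamus: if penular in kamus[nama]: kamus[nama] += tertular
  let d1 := (kamus.map Prod.fst).foldl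
    (fun d nama => if penular ∈ lookupFirst d nama then updFirst d nama tertular else d) kamus
  -- if penular not in kamus: kamus[penular] = tertular else: kamus[penular] += tertular
  if penular ∉ d1.map Prod.fst then d1 ++ [(penular, tertular)]
  else updFirst d1 penular tertular

def penularan (lst_input : List String) (kamus : List (String × List String)) :
    List (String × List String) :=
  match lst_input with
  | [] => kamus                                   -- if len(lst_input) == 0: return kamus
  | line :: rest => penularan rest (stepA kamus line)   -- lst_input[0] processed, recurse on lst_input[1:]

-- ===== PORT B =====
def stepB (kamus : List (String × List String)) (line : String) :
    List (String × List String) :=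
  let parts := PySem.Str.split₀ line
  let penular := (PySem.List.pyGet? parts 0).getD ""    -- parts[0]; none excluded by Pre_
  let tertular := PySem.List.slice parts (some 1) none  -- parts[1:]
  -- kamus = {k: v + tertular if penular in v else v for k, v in kamus.items()}
  let d1 := kamus.map (fun kv => if penular ∈ kv.2 then (kv.1, kv.2 ++ tertular) else kv)
  if penular ∈ d1.map Prod.fst then updFirst d1 penular tertular
  else d1 ++ [(penular, tertular)]

def penularan_alt (lst_input : List String) (kamus : List (String × List String)) :
    List (String × List String) :=
  lst_input.foldl stepB kamus

-- ===== PRECONDITION & SPEC =====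
-- Pre_ excludes (a) whitespace-only lines, on which A raises IndexError at names[0], and
-- (b) association lists with duplicate keys, which cannot arise from a Python dict argument
-- (the dict collapses them), so the assoc-list encoding is accidental there.
def Pre_penularan (lst_input : List String) (kamus : List (String × List String)) : Prop :=
  (∀ s ∈ lst_input, PySem.Str.split₀ s ≠ []) ∧ (kamus.map Prod.fst).Nodup
instance (lst_input : List String) (kamus : List (String × List String)) :
    Decidable (Pre_penularan lst_input kamus) := by unfold Pre_penularan; infer_instance

def pvWitness_penularan : List String × (List (String × List String)) :=
  (["budi ani", "ani caca"], [("ani", ["dodo"])])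

def Spec_penularan (lst_input : List String) (kamus : List (String × List String)) (out : List (String × List String)) : Prop := out = penularan_alt lst_input kamus
instance (lst_input : List String) (kamus : List (String × List String)) (out : List (String × List String)) : Decidable (Spec_penularan lst_input kamus out) := by unfold Spec_penularan; infer_instance

-- ===== CLAIM (what is proved, stated in full; the proofs are below) =====
def Claim_equal_penularan : Prop := ∀ (lst_input : List String) (kamus : List (String × List String)), Dom_penularan lst_input kamus → Pre_penularan lst_input kamus → Spec_penularan lst_input kamus (penularan lst_input kamus)

-- ===== LEMMAS AND PROOFS =====

theorem lookupFirst_append_not_mem (L1 L2 : List (String × List String)) (k : String)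
    (h : k ∉ L1.map Prod.fst) : lookupFirst (L1 ++ L2) k = lookupFirst L2 k := by
  induction L1 with
  | nil => rfl
  | cons kv rest ih =>
    simp only [List.map_cons, List.mem_cons, not_or] at h
    simp [lookupFirst, Ne.symm h.1, ih h.2]

theorem updFirst_append_not_mem (L1 L2 : List (String × List String)) (k : String)
    (t : List String) (h : k ∉ L1.map Prod.fst) :
    updFirst (L1 ++ L2) k t = L1 ++ updFirst L2 k t := by
  induction L1 with
  | nil => rfl
  | cons kv rest ih =>
    simp only [List.map_cons, List.mem_cons, not_or] at h
    simp [updFirst, Ne.symm h.1, ih h.2]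

theorem keys_updFirst (L : List (String × List String)) (k : String) (t : List String) :
    (updFirst L k t).map Prod.fst = L.map Prod.fst := by
  induction L with
  | nil => rfl
  | cons kv rest ih =>
    by_cases h : kv.1 = k <;> simp [updFirst, h, ih]

-- A's key-scan loop, started on the dict it scans, computes B's pure map (unique keys).
theorem foldl_scan_eq_map (p : String) (t : List String) :
    ∀ (post pre : List (String × List String)),
      (∀ k ∈ post.map Prod.fst, k ∉ pre.map Prod.fst) →
      (post.map Prod.fst).Nodup →
      (post.map Prod.fst).foldl
        (fun d nama => if p ∈ lookupFirst d nama then updFirst d nama t else d) (pre ++ post)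
      = pre ++ post.map (fun kv => if p ∈ kv.2 then (kv.1, kv.2 ++ t) else kv) := by
  intro post
  induction post with
  | nil => intro pre _ _; simp
  | cons kv rest ih =>
    intro pre hdisj hnd
    simp only [List.map_cons, List.foldl_cons]
    have hk : kv.1 ∉ pre.map Prod.fst := hdisj kv.1 (by simp)
    have hlook : lookupFirst (pre ++ kv :: rest) kv.1 = kv.2 := by
      rw [lookupFirst_append_not_mem _ _ _ hk]; simp [lookupFirst]
    have hupd : updFirst (pre ++ kv :: rest) kv.1 t = pre ++ (kv.1, kv.2 ++ t) :: rest := by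
      rw [updFirst_append_not_mem _ _ _ _ hk]; simp [updFirst]
    simp only [List.map_cons, List.nodup_cons] at hnd
    by_cases hp : p ∈ kv.2
    · rw [if_pos (hlook ▸ hp), hupd]
      have := ih (pre ++ [(kv.1, kv.2 ++ t)])
        (by intro k hkm
            simp only [List.map_append, List.mem_append, List.map_cons, List.map_nil,
              List.mem_singleton, not_or]
            exact ⟨hdisj k (by simp [hkm]), fun h => hnd.1 (h ▸ hkm)⟩) hnd.2
      simpa [hp] using this
    · rw [if_neg (by rw [hlook]; exact hp)]
      have := ih (pre ++ [kv])
        (by intro k hkm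
            simp only [List.map_append, List.mem_append, List.map_cons, List.map_nil,
              List.mem_singleton, not_or]
            exact ⟨hdisj k (by simp [hkm]), fun h => hnd.1 (h ▸ hkm)⟩) hnd.2
      simpa [hp] using this

theorem foldl_scan_eq_map' (p : String) (t : List String) (L : List (String × List String))
    (h : (L.map Prod.fst).Nodup) :
    (L.map Prod.fst).foldl
        (fun d nama => if p ∈ lookupFirst d nama then updFirst d nama t else d) L
      = L.map (fun kv => if p ∈ kv.2 then (kv.1, kv.2 ++ t) else kv) := by
  simpa using foldl_scan_eq_map p t L [] (by simp) h

theorem keys_mapStep (L : List (String × List String)) (p : String) (t : List String) :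
    (L.map (fun kv => if p ∈ kv.2 then (kv.1, kv.2 ++ t) else kv)).map Prod.fst
      = L.map Prod.fst := by
  induction L with
  | nil => rfl
  | cons kv rest ih => by_cases h : p ∈ kv.2 <;> simp [h, ih]

-- one line of A equals one line of B, on a unique-key dict
theorem stepA_eq_stepB (kamus : List (String × List String)) (line : String)
    (hnd : (kamus.map Prod.fst).Nodup) : stepA kamus line = stepB kamus line := by
  simp only [stepA, stepB]
  rw [foldl_scan_eq_map' _ _ kamus hnd, ite_not]

theorem keys_stepB (kamus : List (String × List String)) (line : String)
    (hnd : (kamus.map Prod.fst).Nodup) : ((stepB kamus line).map Prod.fst).Nodup := by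
  simp only [stepB]
  split
  · rwa [keys_updFirst, keys_mapStep]
  · rename_i hni
    rw [keys_mapStep] at hni
    rw [List.map_append, keys_mapStep]
    refine List.Nodup.append hnd (List.nodup_singleton _) ?_
    intro a ha hb
    simp only [List.map_cons, List.map_nil, List.mem_singleton] at hb
    subst hb
    exact hni ha

theorem penularan_eq_foldl (lst : List String) :
    ∀ kamus : List (String × List String), (kamus.map Prod.fst).Nodup →
      penularan lst kamus = lst.foldl stepB kamus := by
  induction lst with
  | nil => intro kamus _; rfl
  | cons line rest ih =>
    intro kamus hnd
    show penularan rest (stepA kamus line) = _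
    rw [stepA_eq_stepB kamus line hnd, List.foldl_cons,
      ih (stepB kamus line) (keys_stepB kamus line hnd)]

-- ===== VERDICT (by name: the statement is the Claim_ definition above) =====
theorem penularan_spec : Claim_equal_penularan := by
  intro lst kamus _ hpre
  unfold Spec_penularan penularan_alt
  exact penularan_eq_foldl lst kamus hpre.2
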